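-- pv_equiv track=rewrite | github.com/crisbal/Appunti-Unimib | Programmazione/letitsnow.py | updateMx
-- ===== SOURCE A (Python) =====
-- def updateMx(mx):
-- 	for i in range(len(mx)):
-- 		for j in range(len(mx[i])):
-- 			if mx[i][j] == '*':
-- 				mx[i][j] = '#' #deve ancora cedere
--
-- 	for i in range(0, len(mx)):
-- 		i = len(mx)-1-i
-- 		for j in range(0, len(mx[i])):
-- 			if mx[i][j] == '#' and i!=len(mx)-1:
-- 				#potrebbe cadere
-- 				#controllo sotto
-- 				if mx[i+1][j] != '*' and mx[i+1][j] != '#':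
-- 					mx[i+1][j] = '*'
-- 					mx[i][j] = ' '
-- 	return mx
-- ===== SOURCE B (Python) =====
-- def updateMx(mx):
--     # Declarative recomputation instead of A's mutating cascade (mx is still updated in place at the end):
--     # a snow cell ('*'/'#') ends up resting ('#') iff the cells below it are solid snow all the way to the
--     # last row (A's bottom-up pass cascades a whole stack down one step otherwise); every other new cell
--     # value is a pure function of the old cell, its support flag and the old cell above it.
--     n = len(mx)
--
--     def snow(c):
--         return c == '*' or c == '#'
--
--     # support[i][j]: cell (i,j) is snow and the column below it is snow down to the last row
--     support = [None] * n
--     for i in range(n - 1, -1, -1):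
--         support[i] = [snow(c) and (i == n - 1 or (j < len(mx[i + 1]) and support[i + 1][j]))
--                       for j, c in enumerate(mx[i])]
--
--     out = []
--     for i in range(n):
--         above = mx[i - 1] if i > 0 else []
--         out.append(['#' if support[i][j]
--                     else '*' if j < len(above) and snow(above[j])
--                     else ' ' if snow(c)
--                     else c
--                     for j, c in enumerate(mx[i])])
--
--     for i in range(n):
--         mx[i][:] = out[i]
--     return mx
-- ===== Notes on version B (the rewrite author's own statement) =====
-- stated objective: alternative
-- what changed: Replaces A's mark pass plus bottom-up mutating cascade with a declarative computation: a boolean support table (a snow cell rests iff the column below it is solid snow down to the last row, the closed form of A's cascade) is built first, then every new cell is a pure function of the old cell, its support flag and the old cell above; rows are written back at the end.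
import Mathlib
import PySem

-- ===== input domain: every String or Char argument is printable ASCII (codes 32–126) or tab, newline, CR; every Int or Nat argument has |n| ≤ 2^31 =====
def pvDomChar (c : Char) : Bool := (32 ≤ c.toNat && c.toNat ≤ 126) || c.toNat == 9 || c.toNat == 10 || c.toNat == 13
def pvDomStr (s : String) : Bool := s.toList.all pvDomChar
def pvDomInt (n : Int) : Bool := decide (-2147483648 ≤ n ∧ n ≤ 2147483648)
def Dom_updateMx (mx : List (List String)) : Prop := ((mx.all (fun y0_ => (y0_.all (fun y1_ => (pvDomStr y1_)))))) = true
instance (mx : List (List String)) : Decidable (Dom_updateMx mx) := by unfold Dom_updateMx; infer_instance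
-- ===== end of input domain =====

-- B replaces A's mutating bottom-up cascade by a support table + pure per-cell map; the claim is about
-- the RETURN value (both Pythons also mutate mx in place, ending in the same state).
def pvIsSnow (s : String) : Bool := s == "*" || s == "#"

-- ===== PORT A =====
-- first pass of A: every '*' becomes '#'
def pvMarkRow (r : List String) : List String :=
  r.map (fun c => if c == "*" then "#" else c)

-- one step of A's second pass: row r (being processed) above the already-processed row `below`;
-- out-of-range mx[i+1][j] (an IndexError in Python) is excluded by Pre_updateMx, getD " " is arbitrary there
def pvFallRow (r below : List String) : List String × List String :=
  (r.mapIdx (fun j c => if c == "#" && !(pvIsSnow (below.getD j " ")) then " " else c),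
   below.mapIdx (fun j c => if decide (j < r.length) && (r.getD j " " == "#") && !(pvIsSnow c) then "*" else c))

-- A's second pass: i from len-1 down to 0 = process the tail first, then the head row against the processed tail's head
def pvFallRec : List (List String) → List (List String)
  | [] => []
  | [r] => [r]
  | r :: rest =>
    match pvFallRec rest with
    | [] => [r]
    | b :: rest' => (pvFallRow r b).1 :: (pvFallRow r b).2 :: rest'

def updateMx (mx : List (List String)) : List (List String) :=
  pvFallRec (mx.map pvMarkRow)

-- ===== PORT B =====
-- support table, built bottom-up: cell is snow and the column below it is snow down to the last row
def pvSupp : List (List String) → List (List Bool)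
  | [] => []
  | [r] => [r.map pvIsSnow]
  | r :: r2 :: rest =>
    match pvSupp (r2 :: rest) with
    | [] => []  -- unreachable: pvSupp of a nonempty list is nonempty
    | s2 :: srest =>
      (r.mapIdx (fun j c => pvIsSnow c && (decide (j < r2.length) && s2.getD j false))) :: s2 :: srest

-- new value of each cell: a pure function of old cell, its support flag and the old row above
def pvRowOut (above : List String) (suppRow : List Bool) (r : List String) : List String :=
  r.mapIdx (fun j c =>
    if suppRow.getD j false then "#"
    else if decide (j < above.length) && pvIsSnow (above.getD j " ") then "*"
    else if pvIsSnow c then " " else c)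

-- the output loop of Source B, carrying the (old) row above
def pvOutRows : List String → List (List String) → List (List Bool) → List (List String)
  | _, [], _ => []
  | _, _ :: _, [] => []  -- unreachable: pvSupp has one row per grid row
  | above, r :: rest, s :: srest => pvRowOut above s r :: pvOutRows r rest srest

def updateMx_alt (mx : List (List String)) : List (List String) :=
  pvOutRows [] mx (pvSupp mx)

-- ===== PRECONDITION & SPEC =====
-- Pre_ excludes exactly the ragged grids on which Python A raises IndexError (a snow cell whose
-- column does not exist in the row below).
def Pre_updateMx (mx : List (List String)) : Prop :=
  ∀ p ∈ mx.zip mx.tail, ∀ j, j < p.1.length → pvIsSnow (p.1.getD j " ") = true → j < p.2.length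
instance (mx : List (List String)) : Decidable (Pre_updateMx mx) := by unfold Pre_updateMx; infer_instance
def pvWitness_updateMx : List (List String) := [[" ", "*"], ["#", " "]]

def Spec_updateMx (mx : List (List String)) (out : List (List String)) : Prop := out = updateMx_alt mx
instance (mx : List (List String)) (out : List (List String)) : Decidable (Spec_updateMx mx out) := by unfold Spec_updateMx; infer_instance

-- ===== CLAIM (what is proved, stated in full; the proofs are below) =====
def Claim_equal_updateMx : Prop := ∀ (mx : List (List String)), Dom_updateMx mx → Pre_updateMx mx → Spec_updateMx mx (updateMx mx)

-- ===== LEMMAS AND PROOFS =====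

-- proof-side intermediate: A's two passes fused into one bottom-up sweep (used only to factor the proof)
def pvSweep : List (List String) → List (List String)
  | [] => []
  | [r] => [r.map (fun c => if pvIsSnow c then "#" else c)]
  | r :: rest =>
    match pvSweep rest with
    | [] => [r]
    | b :: rest' =>
      (r.mapIdx (fun j c =>
          if pvIsSnow c then (if pvIsSnow (b.getD j " ") then "#" else " ") else c)) ::
      (b.mapIdx (fun j c =>
          if decide (j < r.length) && pvIsSnow (r.getD j " ") && !(pvIsSnow c) then "*" else c)) ::
      rest'

theorem pvSweep_cons_ne_nil (r : List String) (rest : List (List String)) :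
    pvSweep (r :: rest) ≠ [] := by
  cases rest with
  | nil => simp [pvSweep]
  | cons a b => simp only [pvSweep]; cases pvSweep (a :: b) <;> simp

theorem pvMark_cell (c : String) :
    (if c == "*" then "#" else c) = (if pvIsSnow c then "#" else c) := by
  by_cases h1 : c = "*"
  · simp [h1, pvIsSnow]
  · by_cases h2 : c = "#" <;> simp [pvIsSnow, h1, h2]

theorem pvMark_isHash (c : String) :
    ((if c == "*" then "#" else c) == "#") = pvIsSnow c := by
  by_cases h1 : c = "*"
  · simp [h1, pvIsSnow]
  · by_cases h2 : c = "#" <;> simp [pvIsSnow, h1, h2]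

theorem pvSweep_eq (l : List (List String)) :
    pvFallRec (l.map pvMarkRow) = pvSweep l := by
  induction l with
  | nil => rfl
  | cons r rest ih =>
    cases rest with
    | nil =>
      simp only [List.map, pvFallRec, pvSweep, pvMarkRow]
      exact congrArg (fun x => [x]) (List.map_congr_left (fun c _ => pvMark_cell c))
    | cons r2 rest2 =>
      simp only [List.map, pvFallRec, pvSweep] at ih ⊢
      cases hsw : pvSweep (r2 :: rest2) with
      | nil => exact absurd hsw (pvSweep_cons_ne_nil _ _)
      | cons b rest' =>
        rw [ih, hsw]
        dsimp only
        simp only [List.cons.injEq, and_true]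
        refine ⟨?_, ?_⟩
        · apply List.ext_getElem
          · simp [pvFallRow, pvMarkRow]
          · intro n hn1 hn2
            have hr : n < r.length := by simpa using hn2
            simp only [pvFallRow, List.getElem_mapIdx, pvMarkRow, List.getElem_map]
            rw [pvMark_isHash, pvMark_cell]
            by_cases hs : pvIsSnow r[n] = true <;>
              by_cases hb : pvIsSnow (b[n]?.getD " ") = true <;> simp [hs, hb]
        · apply List.ext_getElem
          · simp [pvFallRow]
          · intro n hn1 hn2
            simp only [pvFallRow, List.getElem_mapIdx]
            have hlen : (pvMarkRow r).length = r.length := by simp [pvMarkRow]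
            have hg : ∀ hn : n < r.length,
                ((pvMarkRow r).getD n " " == "#") = pvIsSnow (r.getD n " ") := by
              intro hn
              rw [List.getD_eq_getElem?_getD, List.getD_eq_getElem?_getD, pvMarkRow,
                  List.getElem?_map, List.getElem?_eq_getElem hn]
              simp only [Option.map_some, Option.getD_some]
              exact pvMark_isHash _
            simp only [hlen]
            by_cases hn : n < r.length
            · rw [hg hn]
            · simp [hn]

theorem pvSupp_length : ∀ l : List (List String), (pvSupp l).length = l.length := by
  intro l
  induction l with
  | nil => rfl
  | cons r rest ih =>
    cases rest with
    | nil => rfl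
    | cons r2 rest2 =>
      simp only [pvSupp]
      cases h : pvSupp (r2 :: rest2) with
      | nil => rw [h] at ih; simp at ih
      | cons s2 srest => rw [h] at ih; simpa using ih

theorem pvSupp_row_length (r : List String) (rest : List (List String)) (s : List Bool)
    (srest : List (List Bool)) (h : pvSupp (r :: rest) = s :: srest) : s.length = r.length := by
  cases rest with
  | nil => simp only [pvSupp, List.cons.injEq] at h; rw [← h.1]; simp
  | cons r2 rest2 =>
    simp only [pvSupp] at h
    cases h2 : pvSupp (r2 :: rest2) with
    | nil =>
      have := pvSupp_length (r2 :: rest2); rw [h2] at this; simp at this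
    | cons s2 srest2 =>
      rw [h2] at h
      simp only [List.cons.injEq] at h
      rw [← h.1]; simp

-- snow in B's output row with no row above ⇔ the support flag (non-snow cells keep a non-snow value)
theorem pvRowOut_snow (s : List Bool) (r : List String) (j : Nat) (hj : j < r.length) :
    pvIsSnow ((pvRowOut [] s r).getD j " ") = s.getD j false := by
  have hlt : j < (pvRowOut [] s r).length := by simpa [pvRowOut] using hj
  rw [List.getD_eq_getElem?_getD, List.getElem?_eq_getElem hlt]
  simp only [Option.getD_some, pvRowOut, List.getElem_mapIdx, List.getD_eq_getElem?_getD]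
  by_cases hs : s[j]?.getD false = true
  · simp [hs, pvIsSnow]
  · simp only [Bool.not_eq_true] at hs
    by_cases h1 : r[j] = "*" <;> by_cases h2 : r[j] = "#" <;>
      simp [hs, h1, h2, pvIsSnow]

-- the crux: under Pre_, the fused sweep equals B's support-table computation
theorem pvSweep_eq_alt : ∀ l : List (List String), Pre_updateMx l →
    pvSweep l = pvOutRows [] l (pvSupp l) := by
  intro l
  induction l with
  | nil => intro _; rfl
  | cons r rest ih =>
    intro hpre
    have hpre' : Pre_updateMx rest := by
      intro p hp j h1 h2
      refine hpre p ?_ j h1 h2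
      cases rest with
      | nil => simp at hp
      | cons r2 rest2 => exact List.mem_cons_of_mem _ (by simpa using hp)
    cases rest with
    | nil =>
      simp only [pvSweep, pvSupp, pvOutRows, pvRowOut, List.cons.injEq, and_true]
      apply List.ext_getElem
      · simp
      · intro n h1 h2
        simp only [List.getElem_map, List.getElem_mapIdx]
        have : (r.map pvIsSnow).getD n false = pvIsSnow (r[n]'(by simpa using h2)) := by
          rw [List.getD_eq_getElem?_getD, List.getElem?_map,
              List.getElem?_eq_getElem (by simpa using h2)]
          simp
        rw [this]
        by_cases hs : pvIsSnow (r[n]'(by simpa using h2)) = true <;> simp [hs]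
    | cons r2 rest2 =>
      -- the pair condition from Pre_ on (r, r2)
      have hpair : ∀ j, j < r.length → pvIsSnow (r.getD j " ") = true → j < r2.length := by
        intro j h1 h2
        exact hpre (r, r2) (by simp) j h1 h2
      have hih := ih hpre'
      cases hsupp : pvSupp (r2 :: rest2) with
      | nil => have := pvSupp_length (r2 :: rest2); rw [hsupp] at this; simp at this
      | cons s2 srest =>
        have hs2len : s2.length = r2.length := pvSupp_row_length _ _ _ _ hsupp
        rw [hsupp] at hih
        simp only [pvOutRows] at hih
        simp only [pvSweep, pvSupp, hsupp, hih, pvOutRows, List.cons.injEq, and_true]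
        constructor
        · -- head rows agree
          apply List.ext_getElem
          · simp [pvRowOut]
          · intro n h1 h2
            have hn : n < r.length := by simpa [pvRowOut] using h2
            simp only [List.getElem_mapIdx]
            have hsn : pvIsSnow ((pvRowOut [] s2 r2).getD n " ") = s2.getD n false := by
              by_cases hnr2 : n < r2.length
              · exact pvRowOut_snow s2 r2 n hnr2
              · have e1 : (pvRowOut [] s2 r2).getD n " " = " " := by
                  apply List.getD_eq_default
                  simpa [pvRowOut] using le_of_not_gt hnr2
                have e2 : s2.getD n false = false := by
                  apply List.getD_eq_default; omega
                rw [e1, e2]; rfl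
            have hsupn : (List.mapIdx (fun j c => pvIsSnow c &&
                (decide (j < r2.length) && s2.getD j false)) r).getD n false
                  = (pvIsSnow (r[n]'hn) && s2.getD n false) := by
              rw [List.getD_eq_getElem?_getD, List.getElem?_eq_getElem (by simpa using hn)]
              simp only [List.getElem_mapIdx, Option.getD_some]
              by_cases hcs : pvIsSnow (r[n]'hn) = true
              · have hlt : n < r2.length := by
                  apply hpair n hn
                  rw [List.getD_eq_getElem?_getD, List.getElem?_eq_getElem hn]
                  simpa using hcs
                simp [hlt, hcs]
              · simp only [Bool.not_eq_true] at hcs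
                simp [hcs]
            simp only [hsn]
            simp only [pvRowOut, List.getElem_mapIdx, hsupn]
            by_cases hcs : pvIsSnow (r[n]'hn) = true <;>
              by_cases hb : s2.getD n false = true <;>
                simp [hcs, hb]
        · -- second rows agree
          apply List.ext_getElem
          · simp [pvRowOut]
          · intro n h1 h2
            have hn2 : n < r2.length := by simpa [pvRowOut] using h2
            have hlen1 : n < (pvRowOut [] s2 r2).length := by simpa [pvRowOut] using hn2
            have hget : (pvRowOut [] s2 r2)[n]'hlen1 =
                (if s2[n]?.getD false = true then "#"
                 else if pvIsSnow (r2[n]'hn2) = true then " " else (r2[n]'hn2)) := by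
              simp [pvRowOut, List.getElem_mapIdx, List.getD_eq_getElem?_getD]
            have hsn : pvIsSnow ((pvRowOut [] s2 r2)[n]'hlen1) = s2[n]?.getD false := by
              have := pvRowOut_snow s2 r2 n hn2
              rw [List.getD_eq_getElem?_getD, List.getElem?_eq_getElem hlen1] at this
              simpa [List.getD_eq_getElem?_getD] using this
            simp only [List.getElem_mapIdx]
            simp only [hsn]
            simp only [hget]
            simp only [pvRowOut, List.getElem_mapIdx]
            by_cases hs2 : s2[n]?.getD false = true <;>
              by_cases hnr : n < r.length <;>
                by_cases hrs : pvIsSnow (r[n]?.getD " ") = true <;>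
                  simp [hs2, hnr, hrs, List.getD_eq_getElem?_getD]

-- ===== VERDICT (by name: the statement is the Claim_ definition above) =====
theorem updateMx_spec : Claim_equal_updateMx := by
  intro mx _ hpre
  show updateMx mx = updateMx_alt mx
  rw [updateMx, updateMx_alt, pvSweep_eq, pvSweep_eq_alt mx hpre]
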